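-- pv_equiv track=rewrite | github.com/pavelkabakov/Python_Deep | les_2/Sem001/task_3.py | func_bin_or_oct_from_number
-- ===== SOURCE A (Python) =====
-- def func_bin_or_oct_from_number(number: int, notation: int) -> str:
--     res = ''
--     if notation == 2 or notation == 8:
--         while number > 0:
--             res = str(number % notation) + res
--             number = number // notation
--     else:
--         res += 'Расчет делается для перевода только в двоичную или восьмеричную систему исчисления'
--     return res
-- ===== SOURCE B (Python) =====
-- def func_bin_or_oct_from_number(number: int, notation: int) -> str:
--     if notation not in (2, 8):
--         return 'Расчет делается для перевода только в двоичную или восьмеричную систему исчисления'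
--     if number <= 0:
--         return ''
--     return format(number, 'b' if notation == 2 else 'o')
-- ===== Notes on version B (the rewrite author's own statement) =====
-- stated objective: idiomatic
-- what changed: Replaces the hand-written repeated-division string-building loop with the built-in base conversion format(number, 'b'/'o') behind the same guards.
import Mathlib
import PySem

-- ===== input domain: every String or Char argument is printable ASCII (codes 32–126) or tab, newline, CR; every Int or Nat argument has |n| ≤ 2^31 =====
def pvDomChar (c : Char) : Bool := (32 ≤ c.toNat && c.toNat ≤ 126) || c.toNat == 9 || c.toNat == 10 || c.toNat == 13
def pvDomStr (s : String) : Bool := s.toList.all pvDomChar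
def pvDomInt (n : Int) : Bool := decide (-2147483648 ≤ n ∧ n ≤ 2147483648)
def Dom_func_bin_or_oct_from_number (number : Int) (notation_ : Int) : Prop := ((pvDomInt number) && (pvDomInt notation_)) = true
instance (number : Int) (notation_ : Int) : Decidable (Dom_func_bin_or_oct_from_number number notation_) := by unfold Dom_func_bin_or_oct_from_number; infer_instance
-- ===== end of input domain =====

-- B replaces A's hand-written repeated-division loop by the built-in base conversion
-- (format(number,'b'/'o'), ported as Nat.toDigits) behind the same guards; objective: idiomatic.

-- ===== PORT A =====
-- A's while loop; the extra '2 ≤ notation_' in the guard only ensures termination in Lean: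
-- the sole call site has notation_ = 2 or 8, and for number ≤ 0 the guard is equally false.
def pvALoop (number : Int) (notation_ : Int) (res : String) : String :=
  if h : 0 < number ∧ 2 ≤ notation_ then
    pvALoop (PySem.Int.floordiv number notation_) notation_
      (PySem.Int.toStr (PySem.Int.mod number notation_) ++ res)
  else res
termination_by number.toNat
decreasing_by
  have h1 : PySem.Int.floordiv number notation_ = number / notation_ :=
    PySem.Int.floordiv_eq_ediv_of_pos (by omega)
  have h2 : number / notation_ < number := by
    rw [Int.ediv_lt_iff_lt_mul (by omega)]
    nlinarith [h.1, h.2]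
  have h3 : 0 ≤ number / notation_ := Int.ediv_nonneg (by omega) (by omega)
  rw [h1]; omega


def func_bin_or_oct_from_number (number : Int) (notation_ : Int) : String :=
  if notation_ = 2 ∨ notation_ = 8 then
    pvALoop number notation_ ""
  else
    "" ++ "Расчет делается для перевода только в двоичную или восьмеричную систему исчисления"

-- ===== PORT B =====
def func_bin_or_oct_from_number_alt (number : Int) (notation_ : Int) : String :=
  if ¬ (notation_ = 2 ∨ notation_ = 8) then
    "Расчет делается для перевода только в двоичную или восьмеричную систему исчисления"
  else if number ≤ 0 then ""
  else String.mk (Nat.toDigits (if notation_ = 2 then 2 else 8) number.toNat)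

-- ===== PRECONDITION & SPEC =====
def Spec_func_bin_or_oct_from_number (number : Int) (notation_ : Int) (out : String) : Prop := out = func_bin_or_oct_from_number_alt number notation_
instance (number : Int) (notation_ : Int) (out : String) : Decidable (Spec_func_bin_or_oct_from_number number notation_ out) := by unfold Spec_func_bin_or_oct_from_number; infer_instance

-- ===== CLAIM (what is proved, stated in full; the proofs are below) =====
def Claim_equal_func_bin_or_oct_from_number : Prop := ∀ (number : Int) (notation_ : Int), Dom_func_bin_or_oct_from_number number notation_ → Spec_func_bin_or_oct_from_number number notation_ (func_bin_or_oct_from_number number notation_)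

-- ===== LEMMAS AND PROOFS =====

theorem pv_toList_mk (l : List Char) : (String.mk l).toList = l :=
  Eq.symm (String.ofList_eq.mp rfl)

theorem pv_digit_toStr : ∀ k : Nat, k < 10 → PySem.Int.toStr (k : Int) = String.mk [Nat.digitChar k] := by
  decide

theorem pv_loop_eq (b : Nat) (hb : 2 ≤ b) (hb10 : b ≤ 10) :
    ∀ (f n : Nat) (acc : List Char), n < f → 0 < n →
      pvALoop (n : Int) (b : Int) (String.mk acc) = String.mk (Nat.toDigitsCore b f n acc) := by
  intro f
  induction f with
  | zero => intro n acc h; omega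
  | succ f ih =>
    intro n acc hnf hn
    rw [pvALoop]
    have hguard : (0 : Int) < (n : Int) ∧ (2 : Int) ≤ (b : Int) :=
      ⟨by exact_mod_cast hn, by exact_mod_cast hb⟩
    rw [dif_pos hguard]
    have hmod : PySem.Int.mod (n : Int) (b : Int) = ((n % b : Nat) : Int) :=
      PySem.Int.mod_natCast n b
    have hdiv : PySem.Int.floordiv (n : Int) (b : Int) = ((n / b : Nat) : Int) :=
      PySem.Int.floordiv_natCast n b
    have hdig : PySem.Int.toStr ((n % b : Nat) : Int) = String.mk [Nat.digitChar (n % b)] :=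
      pv_digit_toStr (n % b) (by have := Nat.mod_lt n (show 0 < b by omega); omega)
    rw [hmod, hdiv, hdig]
    have hcons : String.mk [Nat.digitChar (n % b)] ++ String.mk acc
        = String.mk (Nat.digitChar (n % b) :: acc) := by
      apply String.ext; simp [pv_toList_mk]
    rw [hcons]
    rw [Nat.toDigitsCore]
    by_cases hz : n / b = 0
    · simp only [hz, if_pos, Nat.cast_zero]
      rw [pvALoop]
      rw [dif_neg (by omega)]
    · simp only [if_neg hz]
      exact ih (n / b) (Nat.digitChar (n % b) :: acc)
        (by have := Nat.div_lt_self hn (show 1 < b by omega); omega) (Nat.pos_of_ne_zero hz)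

theorem pvALoop_nonpos (number notation_ : Int) (res : String) (h : number ≤ 0) :
    pvALoop number notation_ res = res := by
  rw [pvALoop]; rw [dif_neg (by omega)]

theorem func_bin_or_oct_from_number_spec : Claim_equal_func_bin_or_oct_from_number := by
  intro number notation_ _
  unfold Spec_func_bin_or_oct_from_number func_bin_or_oct_from_number func_bin_or_oct_from_number_alt
  by_cases hb : notation_ = 2 ∨ notation_ = 8
  · rw [if_pos hb, if_neg (not_not_intro hb)]
    by_cases hn : number ≤ 0
    · rw [if_pos hn, pvALoop_nonpos _ _ _ hn]
    · rw [if_neg hn]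
      have hn2 : 0 < number := by omega
      obtain ⟨m, hm⟩ : ∃ m : Nat, number = (m : Int) := ⟨number.toNat, by omega⟩
      subst hm
      have hpos : 0 < m := by exact_mod_cast hn2
      rcases hb with hb | hb
      · rw [if_pos hb, hb]
        have := pv_loop_eq 2 (by norm_num) (by norm_num) (m + 1) m [] (by omega) hpos
        simpa [Nat.toDigits] using this
      · have hb2 : ¬ notation_ = 2 := by omega
        rw [if_neg hb2, hb]
        have := pv_loop_eq 8 (by norm_num) (by norm_num) (m + 1) m [] (by omega) hpos
        simpa [Nat.toDigits] using this
  · rw [if_neg hb, if_pos hb]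
    simp
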